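-- pv_equiv track=rewrite | github.com/wilmurillo-ai/Design-Assistant | .skills/openclaw-skills/skills/ucloud-sec/skills-audit/scripts/skills_audit.py | diff_file_manifests
-- ===== SOURCE A (Python) =====
-- def diff_file_manifests(
--     prev_files: dict[str, str], now_files: dict[str, str]
-- ) -> tuple[list[str], list[str], list[str]]:
--     """Return (files_added, files_removed, files_changed)."""
--     prev_set = set(prev_files.keys())
--     now_set = set(now_files.keys())
--     added = sorted(now_set - prev_set)
--     removed = sorted(prev_set - now_set)
--     changed = sorted(
--         k for k in (prev_set & now_set) if prev_files[k] != now_files[k]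
--     )
--     return added, removed, changed
-- ===== SOURCE B (Python) =====
-- def diff_file_manifests(
--     prev_files: dict[str, str], now_files: dict[str, str]
-- ) -> tuple[list[str], list[str], list[str]]:
--     """Return (files_added, files_removed, files_changed)."""
--     pk = sorted(prev_files)
--     nk = sorted(now_files)
--     added, removed, changed = [], [], []
--     i = j = 0
--     while i < len(pk) and j < len(nk):
--         p, n = pk[i], nk[j]
--         if p < n:
--             removed.append(p)
--             i += 1
--         elif n < p:
--             added.append(n)
--             j += 1
--         else:
--             if prev_files[p] != now_files[n]:
--                 changed.append(p)
--             i += 1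
--             j += 1
--     removed += pk[i:]
--     added += nk[j:]
--     return added, removed, changed
-- ===== Notes on version B (the rewrite author's own statement) =====
-- stated objective: alternative
-- what changed: Replaces A's set algebra (two set differences, an intersection plus a filtering generator, each followed by sorted()) with sorting the two key lists once and classifying every key in a single two-pointer merge that emits added/removed/changed already in sorted order, so no sets are built and no post-sort is needed.
import Mathlib
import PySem

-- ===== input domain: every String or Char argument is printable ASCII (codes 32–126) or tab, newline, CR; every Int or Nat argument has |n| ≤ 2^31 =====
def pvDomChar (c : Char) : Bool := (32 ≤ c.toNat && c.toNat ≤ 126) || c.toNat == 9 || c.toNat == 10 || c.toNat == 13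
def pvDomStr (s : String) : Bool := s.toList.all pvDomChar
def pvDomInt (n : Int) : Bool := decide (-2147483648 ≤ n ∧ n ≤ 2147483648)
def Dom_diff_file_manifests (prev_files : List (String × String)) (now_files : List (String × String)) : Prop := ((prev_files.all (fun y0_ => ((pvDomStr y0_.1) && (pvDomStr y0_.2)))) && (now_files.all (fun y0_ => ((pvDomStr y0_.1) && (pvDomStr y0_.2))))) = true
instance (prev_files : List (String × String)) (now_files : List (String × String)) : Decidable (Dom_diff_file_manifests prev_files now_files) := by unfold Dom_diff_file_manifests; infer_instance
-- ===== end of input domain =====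

-- B replaces A's set algebra and three final sorts with sorting the two key lists once and a single
-- two-pointer merge that classifies every key, emitting added/removed/changed already in order (alternative, same cost).

-- ===== PORT A =====
def diff_file_manifests (prev_files : List (String × String)) (now_files : List (String × String)) : List String × List String × List String :=
  let prevD := PySem.Dict.ofList prev_files
  let nowD := PySem.Dict.ofList now_files
  let prev_set : PySem.Set String := PySem.Set.ofList prevD.keys
  let now_set : PySem.Set String := PySem.Set.ofList nowD.keys
  let added := PySem.List.sorted (PySem.Set.diff now_set prev_set) (fun x => x) false
  let removed := PySem.List.sorted (PySem.Set.diff prev_set now_set) (fun x => x) false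
  -- prev_files[k] / now_files[k]: k ranges over the intersection, so both lookups succeed; getD's default is never used (exact)
  let changed := PySem.List.sorted ((PySem.Set.inter prev_set now_set).filter (fun k => prevD.getD k "" != nowD.getD k "")) (fun x => x) false
  (added, removed, changed)

-- ===== PORT B =====
-- the while loop over the indices i, j: structural recursion on the two remaining sorted suffixes;
-- the two base cases are the trailing 'removed += pk[i:]' / 'added += nk[j:]'
def mergeClassify (pd nd : PySem.Dict String String) : List String → List String → List String × List String × List String
  | [], nk => (nk, [], [])
  | p :: pt, [] => ([], p :: pt, [])
  | p :: pt, n :: nt =>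
    if p < n then
      let r := mergeClassify pd nd pt (n :: nt)
      (r.1, p :: r.2.1, r.2.2)
    else if n < p then
      let r := mergeClassify pd nd (p :: pt) nt
      (n :: r.1, r.2.1, r.2.2)
    else
      let r := mergeClassify pd nd pt nt
      if pd.getD p "" != nd.getD n "" then (r.1, r.2.1, p :: r.2.2) else r
termination_by pk nk => pk.length + nk.length
decreasing_by all_goals simp <;> omega

def diff_file_manifests_alt (prev_files : List (String × String)) (now_files : List (String × String)) : List String × List String × List String :=
  let prevD := PySem.Dict.ofList prev_files
  let nowD := PySem.Dict.ofList now_files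
  let pk := PySem.List.sorted prevD.keys (fun x => x) false
  let nk := PySem.List.sorted nowD.keys (fun x => x) false
  mergeClassify prevD nowD pk nk

-- ===== PRECONDITION & SPEC =====
def Spec_diff_file_manifests (prev_files : List (String × String)) (now_files : List (String × String)) (out : List String × List String × List String) : Prop := out = diff_file_manifests_alt prev_files now_files
instance (prev_files : List (String × String)) (now_files : List (String × String)) (out : List String × List String × List String) : Decidable (Spec_diff_file_manifests prev_files now_files out) := by unfold Spec_diff_file_manifests; infer_instance

-- ===== CLAIM (what is proved, stated in full; the proofs are below) =====
def Claim_equal_diff_file_manifests : Prop := ∀ (prev_files : List (String × String)) (now_files : List (String × String)), Dom_diff_file_manifests prev_files now_files → Spec_diff_file_manifests prev_files now_files (diff_file_manifests prev_files now_files)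

-- ===== LEMMAS AND PROOFS =====

-- B's merge computes three filters of the (strictly increasing) sorted key lists
lemma mergeClassify_eq (pd nd : PySem.Dict String String) (pk nk : List String)
    (hp : pk.Pairwise (· < ·)) (hn : nk.Pairwise (· < ·)) :
    mergeClassify pd nd pk nk =
      (nk.filter (fun k => !(pk.contains k)),
       pk.filter (fun k => !(nk.contains k)),
       pk.filter (fun k => nk.contains k && (pd.getD k "" != nd.getD k ""))) := by
  fun_induction mergeClassify pd nd pk nk with
  | case1 nk => simp
  | case2 p pt => simp
  | case3 p pt n nt hlt r ih =>
    subst r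
    obtain ⟨hph, hpt⟩ := List.pairwise_cons.mp hp
    obtain ⟨hnh, hnt⟩ := List.pairwise_cons.mp hn
    rw [ih hpt hn]
    have hpn1 : p ≠ n := ne_of_lt hlt
    have hpn2 : p ∉ nt := fun h => lt_irrefl _ (hlt.trans (hnh _ h))
    have hcongr : ∀ k ∈ n :: nt, ((p :: pt).contains k) = (pt.contains k) := by
      intro k hk
      have hne : k ≠ p := by
        rcases List.mem_cons.mp hk with rfl | hk'
        · exact (ne_of_gt hlt)
        · exact ne_of_gt (hlt.trans (hnh _ hk'))
      simp [List.contains_eq_mem, hne]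
    refine Prod.ext ?_ (Prod.ext ?_ ?_) <;> dsimp only
    · refine List.filter_congr ?_
      intro k hk; simp only [hcongr k hk]
    · rw [List.filter_cons]
      simp [List.contains_eq_mem, hpn1, hpn2]
    · rw [List.filter_cons]
      simp [List.contains_eq_mem, hpn1, hpn2]
  | case4 p pt n nt hlt hgt r ih =>
    subst r
    obtain ⟨hph, hpt⟩ := List.pairwise_cons.mp hp
    obtain ⟨hnh, hnt⟩ := List.pairwise_cons.mp hn
    rw [ih hp hnt]
    have hnp1 : n ≠ p := ne_of_lt hgt
    have hnp2 : n ∉ pt := fun h => lt_irrefl _ (hgt.trans (hph _ h))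
    have hcongr : ∀ k ∈ p :: pt, ((n :: nt).contains k) = (nt.contains k) := by
      intro k hk
      have hne : k ≠ n := by
        rcases List.mem_cons.mp hk with rfl | hk'
        · exact (ne_of_gt hgt)
        · exact ne_of_gt (hgt.trans (hph _ hk'))
      simp [List.contains_eq_mem, hne]
    refine Prod.ext ?_ (Prod.ext ?_ ?_) <;> dsimp only
    · rw [List.filter_cons]
      simp [List.contains_eq_mem, hnp1, hnp2]
    · refine List.filter_congr ?_
      intro k hk; simp only [hcongr k hk]
    · refine List.filter_congr ?_
      intro k hk; simp only [hcongr k hk]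
  | case5 p pt n nt hlt hgt r hd ih =>
    subst r
    have heq : p = n := le_antisymm (not_lt.mp hgt) (not_lt.mp hlt)
    subst heq
    obtain ⟨hph, hpt⟩ := List.pairwise_cons.mp hp
    obtain ⟨hnh, hnt⟩ := List.pairwise_cons.mp hn
    rw [ih hpt hnt]
    have hcn : ∀ k ∈ pt, ((p :: nt).contains k) = (nt.contains k) := by
      intro k hk; simp [List.contains_eq_mem, (ne_of_gt (hph _ hk))]
    have hcp : ∀ k ∈ nt, ((p :: pt).contains k) = (pt.contains k) := by
      intro k hk; simp [List.contains_eq_mem, (ne_of_gt (hnh _ hk))]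
    refine Prod.ext ?_ (Prod.ext ?_ ?_) <;> dsimp only
    · rw [List.filter_cons]
      have h1 : (!((p :: pt).contains p)) = false := by simp [List.contains_eq_mem]
      rw [h1]
      simp only [Bool.false_eq_true, if_false]
      refine (List.filter_congr ?_).symm
      intro k hk; simp only [hcp k hk]
    · rw [List.filter_cons]
      have h1 : (!((p :: nt).contains p)) = false := by simp [List.contains_eq_mem]
      rw [h1]
      simp only [Bool.false_eq_true, if_false]
      refine (List.filter_congr ?_).symm
      intro k hk; simp only [hcn k hk]
    · rw [List.filter_cons]
      have h1 : ((p :: nt).contains p && (pd.getD p "" != nd.getD p "")) = true := by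
        simp [List.contains_eq_mem, hd]
      rw [h1, if_pos rfl]
      refine congrArg (p :: ·) ?_
      refine (List.filter_congr ?_).symm
      intro k hk; simp only [hcn k hk]
  | case6 p pt n nt hlt hgt r hd ih =>
    subst r
    have heq : p = n := le_antisymm (not_lt.mp hgt) (not_lt.mp hlt)
    subst heq
    obtain ⟨hph, hpt⟩ := List.pairwise_cons.mp hp
    obtain ⟨hnh, hnt⟩ := List.pairwise_cons.mp hn
    rw [ih hpt hnt]
    have hcn : ∀ k ∈ pt, ((p :: nt).contains k) = (nt.contains k) := by
      intro k hk; simp [List.contains_eq_mem, (ne_of_gt (hph _ hk))]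
    have hcp : ∀ k ∈ nt, ((p :: pt).contains k) = (pt.contains k) := by
      intro k hk; simp [List.contains_eq_mem, (ne_of_gt (hnh _ hk))]
    refine Prod.ext ?_ (Prod.ext ?_ ?_) <;> dsimp only
    · rw [List.filter_cons]
      have h1 : (!((p :: pt).contains p)) = false := by simp [List.contains_eq_mem]
      rw [h1]
      simp only [Bool.false_eq_true, if_false]
      refine (List.filter_congr ?_).symm
      intro k hk; simp only [hcp k hk]
    · rw [List.filter_cons]
      have h1 : (!((p :: nt).contains p)) = false := by simp [List.contains_eq_mem]
      rw [h1]
      simp only [Bool.false_eq_true, if_false]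
      refine (List.filter_congr ?_).symm
      intro k hk; simp only [hcn k hk]
    · rw [List.filter_cons]
      have h1 : ((p :: nt).contains p && (pd.getD p "" != nd.getD p "")) = false := by
        simp only [Bool.not_eq_true] at hd
        simp [List.contains_eq_mem, hd]
      rw [h1]
      simp only [Bool.false_eq_true, if_false]
      refine (List.filter_congr ?_).symm
      intro k hk; simp only [hcn k hk]

-- sorting with identity key of a duplicate-free list is strictly increasing
lemma sorted_strict (xs : List String) (h : xs.Nodup) :
    (PySem.List.sorted xs (fun x => x) false).Pairwise (· < ·) := by
  have hle : (PySem.List.sorted xs (fun x => x) false).Pairwise (fun a b => a ≤ b) :=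
    PySem.List.sorted_pairwise xs (fun x => x)
  have hnd : (PySem.List.sorted xs (fun x => x) false).Nodup :=
    (PySem.List.sorted_perm xs (fun x => x) false).nodup_iff.mpr h
  exact (hle.and hnd).imp (fun h => lt_of_le_of_ne h.1 h.2)

-- ===== VERDICT (by name: the statement is the Claim_ definition above) =====
theorem diff_file_manifests_spec : Claim_equal_diff_file_manifests := by
  intro prev now _
  unfold Spec_diff_file_manifests diff_file_manifests diff_file_manifests_alt
  dsimp only
  have hp : (PySem.Dict.ofList prev).keys.Nodup := PySem.Dict.nodup_keys_ofList prev
  have hn : (PySem.Dict.ofList now).keys.Nodup := PySem.Dict.nodup_keys_ofList now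
  rw [PySem.Set.ofList_eq_self_of_nodup _ hp, PySem.Set.ofList_eq_self_of_nodup _ hn]
  set prevD := PySem.Dict.ofList prev with hPD
  set nowD := PySem.Dict.ofList now with hND
  set pk := PySem.List.sorted prevD.keys (fun x => x) false with hpk
  set nk := PySem.List.sorted nowD.keys (fun x => x) false with hnk
  have hpks : pk.Pairwise (· < ·) := sorted_strict _ hp
  have hnks : nk.Pairwise (· < ·) := sorted_strict _ hn
  have hpknd : pk.Nodup := hpks.imp (fun {a b} h => ne_of_lt h)
  have hnknd : nk.Nodup := hnks.imp (fun {a b} h => ne_of_lt h)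
  have hmp : ∀ a : String, a ∈ pk ↔ a ∈ prevD.keys := by
    intro a; rw [hpk]; exact PySem.List.mem_sorted prevD.keys (fun x => x) false a
  have hmn : ∀ a : String, a ∈ nk ↔ a ∈ nowD.keys := by
    intro a; rw [hnk]; exact PySem.List.mem_sorted nowD.keys (fun x => x) false a
  rw [mergeClassify_eq prevD nowD pk nk hpks hnks]
  refine Prod.ext ?_ (Prod.ext ?_ ?_)
  · -- added
    apply PySem.List.sorted_eq_of_perm_of_pairwise_lt
    · rw [List.perm_ext_iff_of_nodup (hnknd.filter _) (PySem.Set.nodup_diff _ _ hn)]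
      intro a
      rw [List.mem_filter, PySem.Set.mem_diff]
      simp [List.contains_eq_mem, hmp, hmn]
    · exact hnks.filter _
  · -- removed
    apply PySem.List.sorted_eq_of_perm_of_pairwise_lt
    · rw [List.perm_ext_iff_of_nodup (hpknd.filter _) (PySem.Set.nodup_diff _ _ hp)]
      intro a
      rw [List.mem_filter, PySem.Set.mem_diff]
      simp [List.contains_eq_mem, hmp, hmn]
    · exact hpks.filter _
  · -- changed
    apply PySem.List.sorted_eq_of_perm_of_pairwise_lt
    · rw [List.perm_ext_iff_of_nodup (hpknd.filter _) ((PySem.Set.nodup_inter _ _ hp).filter _)]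
      intro a
      rw [List.mem_filter, List.mem_filter, PySem.Set.mem_inter]
      simp [List.contains_eq_mem, hmp, hmn, and_assoc]
    · exact hpks.filter _
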